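-- pv_equiv track=rewrite | github.com/need-singularity/sylvian-singularity | scripts/nobel_p1_control.py | number_theory_atoms
-- ===== SOURCE A (Python) =====
-- import math
--
-- def number_theory_atoms(n):
--     """Compute number-theoretic functions for n."""
--     # Divisors
--     divs = [d for d in range(1, n+1) if n % d == 0]
--     sigma = sum(divs)
--     tau = len(divs)
--     # Euler totient
--     phi = sum(1 for k in range(1, n+1) if math.gcd(k, n) == 1)
--     # Sum of prime factors with multiplicity
--     sopfr = 0
--     temp = n
--     for p in range(2, n+1):
--         while temp % p == 0:
--             sopfr += p
--             temp //= p
--     # Omega (distinct prime factors)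
--     omega = len(set(p for p in range(2, n+1) if n % p == 0))
--     return {
--         'n': n, 'sigma': sigma, 'tau': tau, 'phi': phi,
--         'sopfr': sopfr, 'omega': omega
--     }
-- ===== SOURCE B (Python) =====
-- import math
--
-- def number_theory_atoms(n):
--     """Compute number-theoretic functions for n."""
--     if n < 1:
--         return {'n': n, 'sigma': 0, 'tau': 0, 'phi': 0, 'sopfr': 0, 'omega': 0}
--     # One fused pass: divisor sum, divisor count, totient count.
--     sigma = tau = phi = 0
--     for d in range(1, n + 1):
--         if n % d == 0:
--             sigma += d
--             tau += 1
--         if math.gcd(d, n) == 1: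
--             phi += 1
--     # Sum of prime factors with multiplicity: trial division up to sqrt.
--     sopfr = 0
--     temp = n
--     p = 2
--     while p * p <= temp:
--         while temp % p == 0:
--             sopfr += p
--             temp //= p
--         p += 1
--     if temp > 1:
--         sopfr += temp
--     # A's "omega" counts the divisors of n that are >= 2, i.e. tau - 1.
--     return {'n': n, 'sigma': sigma, 'tau': tau, 'phi': phi,
--             'sopfr': sopfr, 'omega': tau - 1}
-- ===== Notes on version B (the rewrite author's own statement) =====
-- stated objective: alternative
-- what changed: B fuses A's three separate full scans (divisor list, totient count) into one pass, computes sopfr by trial division only up to sqrt(temp) with the prime remainder added at the end instead of A's scan of every p up to n, and replaces A's fourth scan for 'omega' (which actually counts the divisors >= 2) by the closed form tau - 1.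
import Mathlib
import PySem

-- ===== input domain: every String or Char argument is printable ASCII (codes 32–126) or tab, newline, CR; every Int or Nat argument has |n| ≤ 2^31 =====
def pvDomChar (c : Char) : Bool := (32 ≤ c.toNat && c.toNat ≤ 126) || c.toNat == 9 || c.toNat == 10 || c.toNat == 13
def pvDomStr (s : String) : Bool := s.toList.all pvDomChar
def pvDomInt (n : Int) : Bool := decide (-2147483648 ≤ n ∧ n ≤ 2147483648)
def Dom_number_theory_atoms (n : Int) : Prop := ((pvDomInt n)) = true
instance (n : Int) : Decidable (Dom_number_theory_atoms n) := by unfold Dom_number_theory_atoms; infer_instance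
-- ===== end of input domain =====

-- B fuses A's three full scans into one pass, trial-divides only up to sqrt(temp) for sopfr,
-- and computes A's 'omega' (a count of the divisors ≥ 2) as tau - 1; objective: alternative.

-- ===== PORT A =====
-- Python inner loop 'while temp % p == 0: sopfr += p; temp //= p', state st = (sopfr, temp).
-- The extra conjuncts 2 ≤ p and 1 ≤ temp only make the recursion terminate; they hold on every
-- state the ports reach (p comes from range(2, …), temp stays ≥ 1), so this is exact there.
def pvStrip (p : Int) (st : Int × Int) : Int × Int :=
  if h : 2 ≤ p ∧ 1 ≤ st.2 ∧ PySem.Int.mod st.2 p = 0 then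
    pvStrip p (st.1 + p, PySem.Int.floordiv st.2 p)
  else st
termination_by st.2.toNat
decreasing_by
  rw [PySem.Int.floordiv_eq_ediv_of_pos (by omega)]
  have hd := Int.ediv_add_emod st.2 p
  have hr := Int.emod_nonneg st.2 (show p ≠ 0 by omega)
  have h2 : 0 ≤ st.2 / p := Int.ediv_nonneg (by omega) (by omega)
  have h1 : st.2 / p < st.2 := by nlinarith
  omega

def number_theory_atoms (n : Int) : List (String × Int) :=
  let divs := (PySem.List.pyRange 1 (n+1) 1).filter (fun d => PySem.Int.mod n d == 0)
  let sigma := divs.sum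
  let tau : Int := divs.length
  -- math.gcd ported by hand as Int.gcd (exact: both are the nonnegative gcd)
  let phi : Int := ((PySem.List.pyRange 1 (n+1) 1).filter (fun k => Int.gcd k n == 1)).length
  let st := (PySem.List.pyRange 2 (n+1) 1).foldl (fun st p => pvStrip p st) (0, n)
  let omega : Int :=
    (PySem.Set.ofList ((PySem.List.pyRange 2 (n+1) 1).filter (fun p => PySem.Int.mod n p == 0))).length
  [("n", n), ("sigma", sigma), ("tau", tau), ("phi", phi), ("sopfr", st.1), ("omega", omega)]

-- ===== PORT B =====
-- body of B's fused 'for d in range(1, n+1)' loop; accumulator a = (sigma, tau, phi)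
def pvFuseStep (n : Int) (a : Int × Int × Int) (d : Int) : Int × Int × Int :=
  let a1 := if PySem.Int.mod n d == 0 then (a.1 + d, a.2.1 + 1, a.2.2) else a
  if Int.gcd d n == 1 then (a1.1, a1.2.1, a1.2.2 + 1) else a1

-- needed by pvTrial's termination proof (the inner while never increases temp)
theorem pvStrip_snd_le (p : Int) (st : Int × Int) : (pvStrip p st).2 ≤ st.2 := by
  fun_induction pvStrip p st with
  | case1 st h ih =>
    refine le_trans ih ?_
    have := PySem.Int.floordiv_eq_ediv_of_pos (a := st.2) (b := p) (by omega)
    have h2 : st.2 / p ≤ st.2 := by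
      have hd := Int.ediv_add_emod st.2 p
      have hr := Int.emod_nonneg st.2 (show p ≠ 0 by omega)
      have h3 : 0 ≤ st.2 / p := Int.ediv_nonneg (by omega) (by omega)
      nlinarith
    simpa [this] using h2
  | case2 st h => exact le_refl _

-- Python 'while p * p <= temp:' loop of B; the conjunct 2 ≤ p is for termination only
-- (p starts at 2 and only increases)
def pvTrial (p sopfr temp : Int) : Int × Int :=
  if h : 2 ≤ p ∧ p * p ≤ temp then
    let st := pvStrip p (sopfr, temp)
    pvTrial (p + 1) st.1 st.2
  else (sopfr, temp)
termination_by (temp - p).toNat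
decreasing_by
  have h1 : (pvStrip p (sopfr, temp)).2 ≤ temp := pvStrip_snd_le p (sopfr, temp)
  have h2 : p < temp := by nlinarith [h.1, h.2]
  omega

def number_theory_atoms_alt (n : Int) : List (String × Int) :=
  if n < 1 then
    [("n", n), ("sigma", 0), ("tau", 0), ("phi", 0), ("sopfr", 0), ("omega", 0)]
  else
    let a := (PySem.List.pyRange 1 (n+1) 1).foldl (pvFuseStep n) (0, 0, 0)
    let st := pvTrial 2 0 n
    let sopfr := if 1 < st.2 then st.1 + st.2 else st.1
    [("n", n), ("sigma", a.1), ("tau", a.2.1), ("phi", a.2.2), ("sopfr", sopfr), ("omega", a.2.1 - 1)]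

-- ===== PRECONDITION & SPEC =====
def Spec_number_theory_atoms (n : Int) (out : List (String × Int)) : Prop := out = number_theory_atoms_alt n
instance (n : Int) (out : List (String × Int)) : Decidable (Spec_number_theory_atoms n out) := by unfold Spec_number_theory_atoms; infer_instance

-- ===== CLAIM (what is proved, stated in full; the proofs are below) =====
def Claim_equal_number_theory_atoms : Prop := ∀ (n : Int), Dom_number_theory_atoms n → Spec_number_theory_atoms n (number_theory_atoms n)

-- ===== LEMMAS AND PROOFS =====

-- sum of the prime factors of m with multiplicity, as an integer
def pvG (m : ℕ) : ℤ := ((m.primeFactorsList).sum : ℤ)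

theorem pvG_one : pvG 1 = 0 := by simp [pvG]

theorem pvG_prime {p : ℕ} (hp : p.Prime) : pvG p = p := by
  simp [pvG, Nat.primeFactorsList_prime hp]

theorem pvG_step {p m : ℕ} (hp : p.Prime) (hd : p ∣ m) (hm : m ≠ 0) :
    pvG m = p + pvG (m / p) := by
  have hm2 : m / p ≠ 0 := Nat.div_ne_zero_iff.mpr ⟨hp.ne_zero, Nat.le_of_dvd (Nat.pos_of_ne_zero hm) hd⟩
  have hmul : p * (m / p) = m := Nat.mul_div_cancel' hd
  have hperm := Nat.perm_primeFactorsList_mul (a := p) (b := m / p) hp.pos.ne' hm2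
  rw [hmul] at hperm
  have := hperm.sum_eq
  rw [pvG, pvG, this, List.sum_append, Nat.primeFactorsList_prime hp]
  push_cast [List.sum_cons]
  simp

-- if m has no prime factor below p and p divides m, then p is prime
theorem pv_prime_of_min {p m : ℕ} (hp : 2 ≤ p) (hd : p ∣ m) (hm : 1 ≤ m)
    (hmin : ∀ q : ℕ, q.Prime → q ∣ m → p ≤ q) : p.Prime := by
  have h1 : p.minFac.Prime := Nat.minFac_prime (by omega)
  have h2 : p.minFac ∣ m := dvd_trans (Nat.minFac_dvd p) hd
  have h3 : p ≤ p.minFac := hmin _ h1 h2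
  have h4 : p.minFac ≤ p := Nat.minFac_le (by omega)
  have : p.minFac = p := le_antisymm h4 h3
  rwa [this] at h1

-- if every prime factor of m exceeds √m then m is prime
theorem pv_prime_of_no_small {m P : ℕ} (hm : 2 ≤ m) (hsq : m < P * P)
    (hmin : ∀ q : ℕ, q.Prime → q ∣ m → P ≤ q) : m.Prime := by
  rw [Nat.prime_def_le_sqrt]
  refine ⟨hm, fun k hk2 hksqrt hkdvd => ?_⟩
  have h1 : k.minFac.Prime := Nat.minFac_prime (by omega)
  have h2 : k.minFac ∣ m := dvd_trans (Nat.minFac_dvd k) hkdvd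
  have h3 : P ≤ k.minFac := hmin _ h1 h2
  have h4 : k.minFac ≤ k := Nat.minFac_le (by omega)
  have h5 : P ≤ Nat.sqrt m := le_trans h3 (le_trans h4 hksqrt)
  have h6 : P * P ≤ m := Nat.le_sqrt.mp h5
  omega

-- if m ≥ 1 has all its prime factors above m itself, m = 1
theorem pv_eq_one {m k : ℕ} (hm : 1 ≤ m) (hk : m < k)
    (hmin : ∀ q : ℕ, q.Prime → q ∣ m → k ≤ q) : m = 1 := by
  by_contra h
  have h1 : m.minFac.Prime := Nat.minFac_prime (by omega)
  have h3 : k ≤ m.minFac := hmin _ h1 (Nat.minFac_dvd m)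
  have h4 : m.minFac ≤ m := Nat.minFac_le (by omega)
  omega

-- the inner while loop strips all factors p, adding p for each
theorem pvStrip_char (P T : ℕ) (s : ℤ) (hp : 2 ≤ P) (ht : 1 ≤ T)
    (hmin : ∀ q : ℕ, q.Prime → q ∣ T → P ≤ q) :
    ∃ T' : ℕ, pvStrip (P : ℤ) (s, (T : ℤ)) = (s + (pvG T - pvG T'), (T' : ℤ)) ∧
      1 ≤ T' ∧ T' ≤ T ∧ ∀ q : ℕ, q.Prime → q ∣ T' → P + 1 ≤ q := by
  induction T using Nat.strong_induction_on generalizing s with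
  | _ T ih =>
  by_cases hdvd : P ∣ T
  · have hPp : P.Prime := pv_prime_of_min hp hdvd ht hmin
    have hmod : T % P = 0 := Nat.mod_eq_zero_of_dvd hdvd
    have hT0 : T ≠ 0 := by omega
    have hPT : P ≤ T := Nat.le_of_dvd (by omega) hdvd
    have hq1 : 1 ≤ T / P := (Nat.one_le_div_iff (by omega)).mpr hPT
    have hlt : T / P < T := Nat.div_lt_self (by omega) (by omega)
    have hmin' : ∀ q : ℕ, q.Prime → q ∣ T / P → P ≤ q := fun q hq hqd =>
      hmin q hq (dvd_trans hqd (Nat.div_dvd_of_dvd hdvd))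
    obtain ⟨T', hT'eq, hT'1, hT'le, hT'min⟩ := ih (T / P) hlt (s + (P : ℤ)) hq1 hmin'
    refine ⟨T', ?_, hT'1, le_trans hT'le (le_of_lt hlt), hT'min⟩
    rw [pvStrip, dif_pos]
    · simp only [PySem.Int.floordiv_natCast]
      rw [hT'eq]
      have hstep := pvG_step hPp hdvd hT0
      rw [Prod.mk.injEq]
      exact ⟨by rw [hstep]; ring, rfl⟩
    · refine ⟨by exact_mod_cast hp, ?_, ?_⟩
      · show (1:ℤ) ≤ (T:ℤ)
        exact_mod_cast ht
      · show PySem.Int.mod (T : ℤ) (P : ℤ) = 0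
        simp only [PySem.Int.mod_natCast, hmod]
        rfl
  · have hmod : T % P ≠ 0 := fun h => hdvd (Nat.dvd_of_mod_eq_zero h)
    refine ⟨T, ?_, ht, le_refl T, ?_⟩
    · rw [pvStrip, dif_neg]
      · simp
      · simp only [PySem.Int.mod_natCast]
        intro hcon
        exact hmod (by exact_mod_cast hcon.2.2)
    · intro q hq hqd
      have h1 := hmin q hq hqd
      rcases Nat.lt_or_ge P q with h | h
      · omega
      · have : q = P := by omega
        subst this
        exact absurd hqd hdvd

-- A's sopfr loop over range(2, N+1) fully factors T and sums the prime factors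
theorem pvFoldA (N k T : ℕ) (s : ℤ) (hk : 2 ≤ k) (ht : 1 ≤ T) (htN : T ≤ N)
    (hmin : ∀ q : ℕ, q.Prime → q ∣ T → k ≤ q) :
    (PySem.List.pyRange (k : ℤ) ((N : ℤ) + 1) 1).foldl (fun st p => pvStrip p st) (s, (T : ℤ))
      = (s + pvG T, 1) := by
  rcases Nat.lt_or_ge N k with h | h
  · rw [PySem.List.pyRange_one_eq_nil (by push_cast; omega), List.foldl_nil]
    have hT1 : T = 1 := pv_eq_one ht (by omega) (fun q hq hd => hmin q hq hd)
    subst hT1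
    rw [Prod.mk.injEq]
    exact ⟨by rw [pvG_one]; ring, rfl⟩
  · rw [PySem.List.pyRange_one_cons (by push_cast; omega), List.foldl_cons]
    obtain ⟨T', hT'eq, hT'1, hT'le, hT'min⟩ := pvStrip_char k T s hk ht hmin
    rw [hT'eq]
    have hrec := pvFoldA N (k+1) T' (s + (pvG T - pvG T')) (by omega) hT'1 (by omega) hT'min
    push_cast at hrec ⊢
    rw [hrec, Prod.mk.injEq]
    exact ⟨by ring, rfl⟩
termination_by N + 1 - k
decreasing_by omega

-- B's √-bounded trial division plus the final 'if temp > 1' step sums the prime factors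
theorem pvTrialB (P T : ℕ) (s : ℤ) (hP : 2 ≤ P) (ht : 1 ≤ T)
    (hmin : ∀ q : ℕ, q.Prime → q ∣ T → P ≤ q) :
    (if 1 < (pvTrial (P : ℤ) s (T : ℤ)).2
      then (pvTrial (P : ℤ) s (T : ℤ)).1 + (pvTrial (P : ℤ) s (T : ℤ)).2
      else (pvTrial (P : ℤ) s (T : ℤ)).1) = s + pvG T := by
  rcases Nat.lt_or_ge T (P * P) with h | h
  · rw [pvTrial, dif_neg (by push_cast; omega)]
    rcases Nat.lt_or_ge T 2 with h2 | h2
    · have hT1 : T = 1 := by omega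
      subst hT1
      norm_num [pvG_one]
    · have hprime : T.Prime := pv_prime_of_no_small h2 h hmin
      rw [if_pos (show (1:ℤ) < ((T:ℕ):ℤ) from by exact_mod_cast h2), pvG_prime hprime]
  · have hPT : P ≤ T := le_trans (Nat.le_mul_of_pos_left P (by omega)) h
    rw [pvTrial, dif_pos (by constructor <;> push_cast <;> omega)]
    obtain ⟨T', hT'eq, hT'1, hT'le, hT'min⟩ := pvStrip_char P T s hP ht hmin
    simp only [hT'eq]
    have hrec := pvTrialB (P+1) T' (s + (pvG T - pvG T')) (by omega) hT'1 hT'min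
    push_cast at hrec ⊢
    rw [hrec]
    ring
termination_by T + 1 - P
decreasing_by omega

-- loop fusion: B's single pass computes (sum of divisor filter, its length, coprime count)
theorem pvFuse (n : Int) (l : List Int) : ∀ (s t f : Int),
    l.foldl (pvFuseStep n) (s, t, f)
      = (s + (l.filter (fun d => PySem.Int.mod n d == 0)).sum,
         t + ((l.filter (fun d => PySem.Int.mod n d == 0)).length : Int),
         f + ((l.filter (fun k => Int.gcd k n == 1)).length : Int)) := by
  induction l with
  | nil => intro s t f; simp
  | cons x xs ih =>
    intro s t f
    simp only [List.foldl_cons, List.filter_cons]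
    by_cases hP : (PySem.Int.mod n x == 0) = true <;>
      by_cases hQ : (Int.gcd x n == 1) = true <;>
        simp only [pvFuseStep, hP, hQ, if_true, if_false, Bool.false_eq_true, ih,
            List.sum_cons, List.length_cons, Prod.mk.injEq] <;>
          (push_cast; and_intros <;> (first | trivial | ring))

theorem pv_one_lt {N : ℕ} (h : 1 ≤ N) : (1:ℤ) < (N:ℤ) + 1 := by exact_mod_cast by omega

-- ===== VERDICT (by name: the statement is the Claim_ definition above) =====
theorem number_theory_atoms_spec : Claim_equal_number_theory_atoms := by
  intro n _
  show number_theory_atoms n = number_theory_atoms_alt n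
  unfold number_theory_atoms number_theory_atoms_alt
  by_cases hn : n < 1
  · rw [if_pos hn]
    rw [PySem.List.pyRange_one_eq_nil (show (n:ℤ) + 1 ≤ 1 by omega),
        PySem.List.pyRange_one_eq_nil (show (n:ℤ) + 1 ≤ 2 by omega)]
    simp [PySem.Set.ofList]
  · rw [if_neg hn]
    obtain ⟨N, rfl⟩ : ∃ N : ℕ, n = (N:ℤ) := ⟨n.toNat, (Int.toNat_of_nonneg (by omega)).symm⟩
    have hN1 : 1 ≤ N := by exact_mod_cast not_lt.mp hn
    have hmin0 : ∀ q : ℕ, q.Prime → q ∣ N → 2 ≤ q := fun q hq _ => hq.two_le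
    -- the three fused quantities
    have hfuse := pvFuse (N:ℤ) (PySem.List.pyRange 1 ((N:ℤ)+1) 1) 0 0 0
    -- A's sopfr loop
    have hA := pvFoldA N 2 N 0 (le_refl 2) hN1 (le_refl N) hmin0
    -- B's sopfr loop
    have hB := pvTrialB 2 N 0 (le_refl 2) hN1 hmin0
    -- split range(1, N+1) at its head 1
    have hsplit : PySem.List.pyRange 1 ((N:ℤ)+1) 1 = 1 :: PySem.List.pyRange 2 ((N:ℤ)+1) 1 :=
      PySem.List.pyRange_one_cons (pv_one_lt hN1)
    have h1div : (PySem.Int.mod (N:ℤ) 1 == 0) = true := by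
      rw [PySem.Int.mod_eq_emod_of_pos (by omega)]
      simp [Int.emod_one]
    -- A's omega list is the tail of A's divisor list
    have htail : (PySem.List.pyRange 1 ((N:ℤ)+1) 1).filter (fun d => PySem.Int.mod (N:ℤ) d == 0)
        = 1 :: (PySem.List.pyRange 2 ((N:ℤ)+1) 1).filter (fun p => PySem.Int.mod (N:ℤ) p == 0) := by
      rw [hsplit, List.filter_cons, if_pos h1div]
    have hnodup : ((PySem.List.pyRange 2 ((N:ℤ)+1) 1).filter (fun p => PySem.Int.mod (N:ℤ) p == 0)).Nodup :=
      (PySem.List.nodup_pyRange_one 2 ((N:ℤ)+1)).filter _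
    have hset := PySem.Set.ofList_eq_self_of_nodup _ hnodup
    have hcast : ((2:ℕ):ℤ) = (2:ℤ) := by norm_num
    rw [hcast] at hA hB
    simp only [hfuse, hA, hB, hset, htail]
    simp only [List.length_cons, List.cons.injEq, Prod.mk.injEq]
    and_intros <;> (try rfl) <;> (try push_cast) <;> (try ring)
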